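-- pv_equiv track=rewrite | github.com/cabulous/leetcode | python/43.py | sum_results
-- ===== SOURCE A (Python) =====
-- from itertools import zip_longest
--
-- def sum_results(results):
--     answer = results.pop()
--
--     for result in results:
--         new_answer = []
--         carry = 0
--
--         for digit1, digit2 in zip_longest(result, answer, fillvalue=0):
--             cur_sum = digit1 + digit2 + carry
--             carry = cur_sum // 10
--             new_answer.append(cur_sum % 10)
--
--         if carry != 0:
--             new_answer.append(carry)
--
--         answer = new_answer
--
--     return answer
-- ===== SOURCE B (Python) =====
-- def sum_results(results):
--     answer = results.pop()
--     if not results: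
--         return answer
--
--     def as_int(digits):
--         # little-endian digit list -> the integer it denotes
--         value = 0
--         for d in reversed(digits):
--             value = 10 * value + d
--         return value
--
--     # Keep the running sum as one integer instead of materializing a digit list
--     # per addition.  `width` is the number of digit positions of the running
--     # result: that of the widest operand seen so far, plus one more position
--     # whenever an addition carries out of the top position.
--     total = as_int(answer)
--     width = len(answer)
--     for r in results:
--         width = max(width, len(r))
--         total += as_int(r)
--         if total // 10 ** width:
--             width += 1
--
--     # render the digit list, lowest position first
--     digits = []
--     if width:
--         for _ in range(width - 1):
--             digits.append(total % 10)
--             total //= 10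
--         digits.append(total)
--     return digits
-- ===== Notes on version B (the rewrite author's own statement) =====
-- stated objective: alternative
-- what changed: Instead of A's k-1 pairwise digitwise additions each materializing an intermediate list, B folds the numbers as plain integers, tracking only the running total and the decimal width of the running result (widest operand so far, plus one on carry-out), and renders the digit list once at the end.
import Mathlib
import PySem

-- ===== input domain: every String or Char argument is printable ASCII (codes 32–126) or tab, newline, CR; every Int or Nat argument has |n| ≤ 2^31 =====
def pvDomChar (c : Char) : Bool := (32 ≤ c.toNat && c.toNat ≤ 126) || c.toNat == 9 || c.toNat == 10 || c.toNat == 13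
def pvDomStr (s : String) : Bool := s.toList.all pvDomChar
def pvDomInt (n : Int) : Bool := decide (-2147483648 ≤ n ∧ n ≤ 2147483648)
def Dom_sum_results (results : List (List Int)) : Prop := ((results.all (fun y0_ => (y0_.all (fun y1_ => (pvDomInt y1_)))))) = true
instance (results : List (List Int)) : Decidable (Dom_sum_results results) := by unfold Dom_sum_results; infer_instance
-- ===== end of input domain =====

-- B folds the numbers as plain integers, tracking only the running total and the decimal width
-- of the running result, and renders the digit list once at the end, instead of A's k-1 pairwise
-- digitwise additions (objective: alternative algorithm, no intermediate lists).
-- Both A and B pop the last element of `results` in place (same observable mutation);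
-- the equivalence proved here is about the return value.

-- ===== PORT A =====
-- itertools.zip_longest(result, answer, fillvalue=0)
def pvZipLongest : List Int → List Int → List (Int × Int)
  | [], [] => []
  | a :: as, [] => (a, 0) :: pvZipLongest as []
  | [], b :: bs => (0, b) :: pvZipLongest [] bs
  | a :: as, b :: bs => (a, b) :: pvZipLongest as bs

-- body of A's outer loop: one digitwise addition with carry
def pvAddOnce (answer result : List Int) : List Int :=
  let st := (pvZipLongest result answer).foldl
      (fun (st : List Int × Int) p =>
        -- cur_sum = digit1 + digit2 + carry, written inline
        (st.1 ++ [PySem.Int.mod (p.1 + p.2 + st.2) 10],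
         PySem.Int.floordiv (p.1 + p.2 + st.2) 10)) ([], 0)
  if st.2 ≠ 0 then st.1 ++ [st.2] else st.1

def sum_results (results : List (List Int)) : List Int :=
  match PySem.List.pop? results with
  | none => []   -- IndexError on results.pop(); excluded by Pre_
  | some (answer, rest) => rest.foldl (fun answer result => pvAddOnce answer result) answer

-- ===== PORT B =====
-- helper as_int(digits): Horner evaluation of the little-endian digit list
def pvValue (r : List Int) : Int := r.reverse.foldl (fun v d => 10 * v + d) 0

-- body of B's loop: widen to the operand, add, and grow the width on carry-out
def pvStep (st : Int × Int) (r : List Int) : Int × Int :=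
  let w := max st.2 ((r.length : Int))
  let t := st.1 + pvValue r
  -- 10 ** w : here w ≥ 0 always (max of a previous width and a list length), so ^ on w.toNat is exact
  if PySem.Int.floordiv t (10 ^ w.toNat) ≠ 0 then (t, w + 1) else (t, w)

def sum_results_alt (results : List (List Int)) : List Int :=
  match PySem.List.pop? results with
  | none => []   -- IndexError on results.pop(); excluded by Pre_
  | some (answer, rest) =>
    if rest = [] then answer
    else
      let st := rest.foldl pvStep (pvValue answer, (answer.length : Int))
      -- render the digit list, lowest position first (`if width:` — a zero width has no digits)
      if st.2 = 0 then []
      else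
        -- for _ in range(width - 1): digits.append(total % 10); total //= 10
        let fin := (PySem.List.pyRange 0 (st.2 - 1) 1).foldl
            (fun (p : List Int × Int) _ =>
              (p.1 ++ [PySem.Int.mod p.2 10], PySem.Int.floordiv p.2 10)) ([], st.1)
        fin.1 ++ [fin.2]

-- ===== PRECONDITION & SPEC =====
-- A raises IndexError (results.pop() on an empty list) iff results = []; nothing else is excluded.
def Pre_sum_results (results : List (List Int)) : Prop := results ≠ []
instance (results : List (List Int)) : Decidable (Pre_sum_results results) := by unfold Pre_sum_results; infer_instance
def pvWitness_sum_results : List (List Int) := [[1, 2], [9, 9]]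

def Spec_sum_results (results : List (List Int)) (out : List Int) : Prop := out = sum_results_alt results
instance (results : List (List Int)) (out : List Int) : Decidable (Spec_sum_results results out) := by unfold Spec_sum_results; infer_instance

-- ===== CLAIM (what is proved, stated in full; the proofs are below) =====
def Claim_equal_sum_results : Prop := ∀ (results : List (List Int)), Dom_sum_results results → Pre_sum_results results → Spec_sum_results results (sum_results results)

-- ===== LEMMAS AND PROOFS =====

-- value of a little-endian digit list (spec-side)
def pvV : List Int → Int
  | [] => 0
  | d :: ds => d + 10 * pvV ds

-- combined value of a zipped pair list
def pvW : List (Int × Int) → Int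
  | [] => 0
  | p :: ps => p.1 + p.2 + 10 * pvW ps

-- n low digits of v (little-endian)
def pvDl (v : Int) : Nat → List Int
  | 0 => []
  | n + 1 => PySem.Int.mod v 10 :: pvDl (PySem.Int.floordiv v 10) n

-- the digit list A produces from value v over m zipped positions
def pvNorm (v : Int) (m : Nat) : List Int :=
  pvDl v m ++ (if PySem.Int.floordiv v (10 ^ m) ≠ 0 then [PySem.Int.floordiv v (10 ^ m)] else [])

-- the digit list B emits from state (v, L)
def pvEmit (v : Int) (L : Nat) : List Int :=
  if L = 0 then [] else pvDl v (L - 1) ++ [PySem.Int.floordiv v (10 ^ (L - 1))]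

-- spec-side form of B's loop state step, on Nat lengths
def pvStepN (st : Int × Nat) (r : List Int) : Int × Nat :=
  let m := max r.length st.2
  let v := st.1 + pvV r
  (v, m + (if PySem.Int.floordiv v (10 ^ m) ≠ 0 then 1 else 0))

theorem pv_fd_eq (a : Int) (b : Int) (hb : 0 < b) : PySem.Int.floordiv a b = a / b :=
  PySem.Int.floordiv_eq_ediv_of_pos hb

theorem pv_mod_eq (a : Int) (b : Int) (hb : 0 < b) : PySem.Int.mod a b = a % b :=
  PySem.Int.mod_eq_emod_of_pos hb

theorem pv_fd_one (v : Int) : PySem.Int.floordiv v 1 = v := by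
  rw [pv_fd_eq _ _ (by norm_num)]; simp

theorem pv_fd_fd (v : Int) (n : Nat) :
    PySem.Int.floordiv v (10 ^ (n + 1)) = PySem.Int.floordiv (PySem.Int.floordiv v 10) (10 ^ n) := by
  rw [pv_fd_eq _ _ (by positivity), pv_fd_eq _ _ (by norm_num), pv_fd_eq _ _ (by positivity)]
  rw [Int.ediv_ediv_eq_ediv_mul (by norm_num : (0:Int) ≤ 10)]
  ring_nf

theorem pv_fd_fd' (v : Int) (n : Nat) :
    PySem.Int.floordiv v (10 ^ (n + 1)) = PySem.Int.floordiv (PySem.Int.floordiv v (10 ^ n)) 10 := by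
  rw [pv_fd_eq _ _ (by positivity), pv_fd_eq _ _ (by positivity), pv_fd_eq _ _ (by norm_num)]
  rw [Int.ediv_ediv_eq_ediv_mul (by positivity : (0:Int) ≤ 10 ^ n)]
  rw [← pow_succ]

theorem pv_mod_shift (a b : Int) : PySem.Int.mod (a + 10 * b) 10 = PySem.Int.mod a 10 := by
  rw [pv_mod_eq _ _ (by norm_num), pv_mod_eq _ _ (by norm_num)]
  omega

theorem pv_fd_shift (a b : Int) : PySem.Int.floordiv (a + 10 * b) 10 = PySem.Int.floordiv a 10 + b := by
  rw [pv_fd_eq _ _ (by norm_num), pv_fd_eq _ _ (by norm_num)]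
  omega

theorem pv_mod_add_fd (v : Int) : PySem.Int.mod v 10 + 10 * PySem.Int.floordiv v 10 = v := by
  rw [pv_fd_eq _ _ (by norm_num), pv_mod_eq _ _ (by norm_num)]
  omega

theorem pv_fd_zero_mod (v : Int) (h : PySem.Int.floordiv v 10 = 0) : PySem.Int.mod v 10 = v := by
  rw [pv_fd_eq _ _ (by norm_num)] at h
  rw [pv_mod_eq _ _ (by norm_num)]
  omega

-- pvValue is the Horner loop for pvV
theorem pvValue_aux (r : List Int) : ∀ v : Int,
    r.reverse.foldl (fun v d => 10 * v + d) v = v * 10 ^ r.length + pvV r := by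
  induction r with
  | nil => intro v; simp [pvV]
  | cons d ds ih =>
      intro v
      simp only [List.reverse_cons, List.foldl_append, List.foldl_cons, List.foldl_nil, ih,
        List.length_cons, pvV]
      ring

theorem pvValue_eq (r : List Int) : pvValue r = pvV r := by
  unfold pvValue; rw [pvValue_aux]; simp

theorem pvW_zip (a b : List Int) : pvW (pvZipLongest a b) = pvV a + pvV b := by
  induction a generalizing b with
  | nil =>
      induction b with
      | nil => simp [pvZipLongest, pvW, pvV]
      | cons y ys ihb =>
          simp [pvZipLongest, pvW, pvV] at ihb ⊢
          rw [ihb]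
  | cons x xs ih =>
      cases b with
      | nil =>
          have h : pvW (pvZipLongest xs []) = pvV xs + pvV [] := ih []
          simp [pvV] at h
          simp [pvZipLongest, pvW, pvV, h]
      | cons y ys =>
          simp [pvZipLongest, pvW, pvV, ih ys]
          ring

theorem pvZip_length (a b : List Int) : (pvZipLongest a b).length = max a.length b.length := by
  induction a generalizing b with
  | nil =>
      induction b with
      | nil => simp [pvZipLongest]
      | cons y ys ihb => simp [pvZipLongest] at ihb ⊢; omega
  | cons x xs ih =>
      cases b with
      | nil =>
          have h := ih []
          simp [pvZipLongest] at h ⊢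
          omega
      | cons y ys =>
          have h := ih ys
          simp [pvZipLongest] at h ⊢
          omega

theorem pvDl_length (v : Int) (n : Nat) : (pvDl v n).length = n := by
  induction n generalizing v with
  | zero => simp [pvDl]
  | succ n ih => simp [pvDl, ih]

theorem pvDl_succ_last (v : Int) (n : Nat) :
    pvDl v (n + 1) = pvDl v n ++ [PySem.Int.mod (PySem.Int.floordiv v (10 ^ n)) 10] := by
  induction n generalizing v with
  | zero => simp [pvDl]
  | succ n ih =>
      have h : pvDl v (n + 1 + 1) = PySem.Int.mod v 10 :: pvDl (PySem.Int.floordiv v 10) (n + 1) := rfl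
      rw [h, ih, pv_fd_fd]
      rfl

-- A's inner zip_longest loop, fully characterised
theorem pv_inner (p : List (Int × Int)) : ∀ (acc : List Int) (c : Int),
    p.foldl (fun (st : List Int × Int) q =>
        (st.1 ++ [PySem.Int.mod (q.1 + q.2 + st.2) 10],
         PySem.Int.floordiv (q.1 + q.2 + st.2) 10)) (acc, c)
    = (acc ++ pvDl (pvW p + c) p.length, PySem.Int.floordiv (pvW p + c) (10 ^ p.length)) := by
  induction p with
  | nil => intro acc c; simp [pvW, pvDl]
  | cons q ps ih =>
      intro acc c
      simp only [List.foldl_cons, ih, List.length_cons, pvW]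
      rw [Prod.mk.injEq]
      refine ⟨?_, ?_⟩
      · have hdl : pvDl (q.1 + q.2 + 10 * pvW ps + c) (ps.length + 1)
            = PySem.Int.mod (q.1 + q.2 + c) 10
              :: pvDl (pvW ps + PySem.Int.floordiv (q.1 + q.2 + c) 10) ps.length := by
          show PySem.Int.mod _ 10 :: pvDl (PySem.Int.floordiv _ 10) ps.length = _
          rw [show q.1 + q.2 + 10 * pvW ps + c = (q.1 + q.2 + c) + 10 * pvW ps by ring,
            pv_mod_shift, pv_fd_shift]
          ring_nf
        rw [hdl]
        simp
      · rw [pv_fd_fd, show q.1 + q.2 + 10 * pvW ps + c = (q.1 + q.2 + c) + 10 * pvW ps by ring,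
          pv_fd_shift]
        ring_nf

theorem pvAddOnce_eq (answer result : List Int) :
    pvAddOnce answer result = pvNorm (pvV answer + pvV result) (max result.length answer.length) := by
  unfold pvAddOnce
  simp only [pv_inner, List.nil_append, add_zero, pvW_zip, pvZip_length]
  rw [show pvV result + pvV answer = pvV answer + pvV result by ring]
  unfold pvNorm
  split_ifs with h <;> simp

theorem pvV_norm (v : Int) (m : Nat) : pvV (pvNorm v m) = v := by
  induction m generalizing v with
  | zero =>
      unfold pvNorm pvDl
      rw [pow_zero, pv_fd_one]
      split_ifs with h
      · simp [pvV]
      · simp [pvV]; omega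
  | succ m ih =>
      have hs : pvNorm v (m + 1) = PySem.Int.mod v 10 :: pvNorm (PySem.Int.floordiv v 10) m := by
        unfold pvNorm
        rw [pv_fd_fd]
        rfl
      rw [hs]
      simp only [pvV, ih]
      exact pv_mod_add_fd v

theorem pvNorm_length (v : Int) (m : Nat) :
    (pvNorm v m).length = m + (if PySem.Int.floordiv v (10 ^ m) ≠ 0 then 1 else 0) := by
  unfold pvNorm
  split_ifs with h <;> simp [pvDl_length]

theorem pvNorm_emit (v : Int) (m : Nat) :
    pvNorm v m = pvEmit v (m + (if PySem.Int.floordiv v (10 ^ m) ≠ 0 then 1 else 0)) := by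
  by_cases h : PySem.Int.floordiv v (10 ^ m) ≠ 0
  · rw [if_pos h]
    unfold pvNorm pvEmit
    rw [if_pos h, if_neg (by omega)]
    simp
  · rw [if_neg h]
    rw [not_not] at h
    cases m with
    | zero =>
        rw [pow_zero, pv_fd_one] at h
        subst h
        simp [pvNorm, pvEmit, pvDl]
    | succ m =>
        unfold pvNorm pvEmit
        rw [if_neg (by simpa using h), if_neg (Nat.succ_ne_zero m)]
        simp only [List.append_nil]
        rw [pvDl_succ_last]
        have h10 : PySem.Int.floordiv (PySem.Int.floordiv v (10 ^ m)) 10 = 0 := by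
          rw [← pv_fd_fd']; exact h
        rw [pv_fd_zero_mod _ h10]
        norm_num

-- the main fold: A's repeated additions produce exactly B's rendering
theorem pv_main_fold (rs : List (List Int)) : ∀ (r ans : List Int),
    (r :: rs).foldl (fun answer result => pvAddOnce answer result) ans
      = (fun st : Int × Nat => pvEmit st.1 st.2)
          ((r :: rs).foldl pvStepN (pvV ans, ans.length)) := by
  induction rs with
  | nil =>
      intro r ans
      simp only [List.foldl_cons, List.foldl_nil, pvAddOnce_eq, pvStepN]
      exact pvNorm_emit _ _
  | cons r' rs' ih =>
      intro r ans
      have h1 : (r :: r' :: rs').foldl (fun answer result => pvAddOnce answer result) ans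
          = (r' :: rs').foldl (fun answer result => pvAddOnce answer result) (pvAddOnce ans r) := by
        simp
      have hstart : (pvV (pvAddOnce ans r), (pvAddOnce ans r).length)
          = pvStepN (pvV ans, ans.length) r := by
        rw [pvAddOnce_eq, pvV_norm, pvNorm_length]
        rfl
      have h2 : (r :: r' :: rs').foldl pvStepN (pvV ans, ans.length)
          = (r' :: rs').foldl pvStepN (pvStepN (pvV ans, ans.length) r) := by
        simp
      rw [h1, ih r' (pvAddOnce ans r), h2, ← hstart]

-- B's Int-state step agrees with the Nat-state step
theorem pvStep_cast (v : Int) (L : Nat) (r : List Int) :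
    pvStep (v, (L : Int)) r = ((pvStepN (v, L) r).1, ((pvStepN (v, L) r).2 : Int)) := by
  unfold pvStep pvStepN
  simp only [pvValue_eq]
  have hmax : max ((L : Int)) ((r.length : Int)) = ((max r.length L : Nat) : Int) := by
    simp [Nat.cast_max]
    omega
  rw [hmax]
  simp only [Int.toNat_natCast]
  split_ifs with h <;> simp

theorem pvFold_cast (rest : List (List Int)) : ∀ (v : Int) (L : Nat),
    rest.foldl pvStep (v, (L : Int))
      = ((rest.foldl pvStepN (v, L)).1, ((rest.foldl pvStepN (v, L)).2 : Int)) := by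
  induction rest with
  | nil => intro v L; simp
  | cons r rs ih =>
      intro v L
      simp only [List.foldl_cons]
      rw [pvStep_cast]
      exact ih _ _

-- B's rendering loop
theorem pv_emit_loop (l : List Int) : ∀ (acc : List Int) (t : Int),
    l.foldl (fun (p : List Int × Int) _ =>
        (p.1 ++ [PySem.Int.mod p.2 10], PySem.Int.floordiv p.2 10)) (acc, t)
      = (acc ++ pvDl t l.length, PySem.Int.floordiv t (10 ^ l.length)) := by
  induction l with
  | nil => intro acc t; simp [pvDl]
  | cons x xs ih =>
      intro acc t
      simp only [List.foldl_cons, ih, List.length_cons]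
      rw [Prod.mk.injEq]
      refine ⟨?_, ?_⟩
      · rw [show pvDl t (xs.length + 1)
            = PySem.Int.mod t 10 :: pvDl (PySem.Int.floordiv t 10) xs.length from rfl]
        simp
      · rw [pv_fd_fd]

-- B's rendering computation equals pvEmit
theorem pv_alt_emit (v : Int) (L : Nat) (hL : L ≠ 0) :
    (let fin := (PySem.List.pyRange 0 ((L : Int) - 1) 1).foldl
        (fun (p : List Int × Int) _ =>
          (p.1 ++ [PySem.Int.mod p.2 10], PySem.Int.floordiv p.2 10)) ([], v)
     fin.1 ++ [fin.2]) = pvEmit v L := by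
  have hlen : (PySem.List.pyRange 0 ((L : Int) - 1) 1).length = L - 1 := by
    rw [PySem.List.length_pyRange_one]
    omega
  rw [pv_emit_loop]
  unfold pvEmit
  rw [hlen]
  simp [hL]

-- ===== VERDICT (by name: the statement is the Claim_ definition above) =====
theorem sum_results_spec : Claim_equal_sum_results := by
  intro results _ hpre
  unfold Spec_sum_results
  rcases List.eq_nil_or_concat results with rfl | ⟨ys, y, rfl⟩
  · exact absurd rfl hpre
  unfold sum_results sum_results_alt
  rw [List.concat_eq_append, PySem.List.pop?_last]
  cases ys with
  | nil => simp
  | cons r rs =>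
      simp only [reduceCtorEq, if_neg, not_false_eq_true]
      rw [pv_main_fold rs r y]
      rw [show pvValue y = pvV y from pvValue_eq y, pvFold_cast]
      set st := (r :: rs).foldl pvStepN (pvV y, y.length) with hst
      by_cases h0 : st.2 = 0
      · simp [h0, pvEmit]
      · have hz : ((st.2 : Int)) ≠ 0 := by exact_mod_cast h0
        simp only [hz, if_neg, not_false_eq_true]
        rw [pv_alt_emit st.1 st.2 h0]
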